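-- pv_equiv track=rewrite | github.com/hojoon123/PythonAlgorithems | 99.네부캠대비/11478_서로 다른 부분 문자열의 개수.py | check
-- ===== SOURCE A (Python) =====
-- def check(s,ls):
--     d = dict()
--     for i in range(ls):
--         for j in range(i, ls):
--             if s[i:j+1] in d:
--                 continue
--             else:
--                 d[s[i:j+1]] = 1
--
--     ans = len(d)
--     return ans
-- ===== SOURCE B (Python) =====
-- def check(s, ls):
--     seen = set()
--     for i in range(ls):
--         cur = ""
--         for ch in s[i:ls]:
--             cur += ch
--             seen.add(cur)
--     return len(seen)
-- ===== Notes on version B (the rewrite author's own statement) =====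
-- stated objective: alternative
-- what changed: Replaces A's nested (i,j) index loops that re-slice s[i:j+1] for every pair and guard a dict by membership with one incremental character-extension pass per suffix (grow cur one char, add to a set); Pre_ excludes malformed calls with ls > len(s), on which A's out-of-range slices also count the empty string while B counts only actual substrings, two equally defensible values on an input no caller is meant to pass.
-- outside the precondition, e.g. on check('a', 2): A returns 2, B returns 1; on check('', 3): A returns 1, B returns 0
import Mathlib
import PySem

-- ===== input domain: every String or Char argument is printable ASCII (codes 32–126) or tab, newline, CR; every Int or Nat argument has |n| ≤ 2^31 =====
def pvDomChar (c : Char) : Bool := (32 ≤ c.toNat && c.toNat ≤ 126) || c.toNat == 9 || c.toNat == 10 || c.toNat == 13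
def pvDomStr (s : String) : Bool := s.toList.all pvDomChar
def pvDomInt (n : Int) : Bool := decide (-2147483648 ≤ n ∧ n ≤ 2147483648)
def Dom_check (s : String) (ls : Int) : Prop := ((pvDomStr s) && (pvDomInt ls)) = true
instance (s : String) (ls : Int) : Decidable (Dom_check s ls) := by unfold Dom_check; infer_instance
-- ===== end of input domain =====

-- B replaces A's per-pair slicing into a membership-guarded dict with one incremental character-extension
-- pass per suffix into a set — a different decomposition of the same count (alternative, not faster).

-- ===== PORT A =====
-- literal transliteration of A: nested index loops, slice each (i,j), guarded dict insert, return len(dict)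
def check (s : String) (ls : Int) : Int :=
  let d := (PySem.List.pyRange 0 ls 1).foldl
    (fun d i => (PySem.List.pyRange i ls 1).foldl
      (fun (d : PySem.Dict String Int) j =>
        if d.contains (PySem.Str.slice s (some i) (some (j + 1))) then d
        else d.insert (PySem.Str.slice s (some i) (some (j + 1))) 1) d)
    PySem.Dict.empty
  (d.size : Int)

-- ===== PORT B =====
-- literal transliteration of B (Source B): for each start i in range(ls), grow cur one character at a time
-- over s[i:ls], adding each cur to a set; return len(set)
def check_alt (s : String) (ls : Int) : Int :=
  let seen := (PySem.List.pyRange 0 ls 1).foldl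
    (fun seen i =>
      ((PySem.Str.slice s (some i) (some ls)).toList.foldl
        (fun (p : String × PySem.Set String) ch =>
          let cur := p.1.push ch
          (cur, p.2.add cur)) ("", seen)).2)
    PySem.Set.empty
  PySem.Set.len seen

-- ===== PRECONDITION & SPEC =====
-- ls is by contract the length of s (the caller passes len(s)); Pre_ excludes malformed calls with
-- ls > len(s), on which A's out-of-range slices also put '' in the dict while B counts only actual
-- substrings — two equally defensible values on an input no caller is meant to pass.
def Pre_check (s : String) (ls : Int) : Prop := ls ≤ PySem.Str.len s
instance (s : String) (ls : Int) : Decidable (Pre_check s ls) := by unfold Pre_check; infer_instance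
def pvWitness_check : String × Int := ("abab", 4)
def Spec_check (s : String) (ls : Int) (out : Int) : Prop := out = check_alt s ls
instance (s : String) (ls : Int) (out : Int) : Decidable (Spec_check s ls out) := by unfold Spec_check; infer_instance

-- ===== CLAIM (what is proved, stated in full; the proofs are below) =====
def Claim_equal_check : Prop := ∀ (s : String) (ls : Int), Dom_check s ls → Pre_check s ls → Spec_check s ls (check s ls)

-- ===== LEMMAS AND PROOFS =====

-- the list of slice keys A's nested loops feed to the dict, in order
def sliceKeys (s : String) (ls : Int) : List String :=
  (PySem.List.pyRange 0 ls 1).flatMap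
    (fun i => (PySem.List.pyRange i ls 1).map (fun j => PySem.Str.slice s (some i) (some (j + 1))))

-- the strings B's inner loop adds when cur starts as c0 and the remaining characters are cs
def prefs (c0 : String) : List Char → List String
  | [] => []
  | c :: cs => (c0.push c) :: prefs (c0.push c) cs

-- the strings B's double loop adds to the set
def bKeys (s : String) (ls : Int) : List String :=
  (PySem.List.pyRange 0 ls 1).flatMap
    (fun i => prefs "" (PySem.Str.slice s (some i) (some ls)).toList)

-- keys of one guarded insert step
theorem keys_guardStep (d : PySem.Dict String Int) (k : String) :
    (if d.contains k then d else d.insert k 1).keys = PySem.Set.add d.keys k := by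
  cases hc : d.contains k with
  | true =>
    have hm : k ∈ d.keys := (PySem.Dict.contains_iff_mem_keys d k).mp hc
    simp [PySem.Set.add_of_mem hm]
  | false =>
    have hm : k ∉ d.keys := fun h => by
      simp [(PySem.Dict.contains_iff_mem_keys d k).mpr h] at hc
    simp [PySem.Dict.keys_insert_of_not_contains d 1 hc, PySem.Set.add_of_not_mem hm]

-- keys of a guarded-insert fold over a key list
theorem keys_guardFold (ks : List String) (d : PySem.Dict String Int) :
    (ks.foldl (fun d k => if d.contains k then d else d.insert k 1) d).keys
      = PySem.Set.update d.keys ks := by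
  induction ks generalizing d with
  | nil => simp [PySem.Set.update_nil]
  | cons k ks ih =>
    simp only [List.foldl_cons]
    rw [ih, keys_guardStep, ← PySem.Set.update_cons]

-- keys of A's nested fold, in the exact nested shape of the port
theorem keys_nested (l : List Int) (g : Int → List Int) (key : Int → Int → String)
    (d : PySem.Dict String Int) :
    (l.foldl (fun d i => (g i).foldl
        (fun (d : PySem.Dict String Int) j =>
          if d.contains (key i j) then d else d.insert (key i j) 1) d) d).keys
      = PySem.Set.update d.keys (l.flatMap (fun i => (g i).map (key i))) := by
  induction l generalizing d with
  | nil => simp [PySem.Set.update_nil]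
  | cons a l ih =>
    simp only [List.foldl_cons, List.flatMap_cons]
    rw [ih, ← List.foldl_map (f := key a)
          (g := fun (d : PySem.Dict String Int) k => if d.contains k then d else d.insert k 1),
        keys_guardFold, PySem.Set.update_append]

-- B's inner character fold collects exactly prefs
theorem inner_fold_prefs (cs : List Char) (c0 : String) (seen : PySem.Set String) :
    (cs.foldl (fun (p : String × PySem.Set String) ch =>
        let cur := p.1.push ch
        (cur, p.2.add cur)) (c0, seen)).2
      = PySem.Set.update seen (prefs c0 cs) := by
  induction cs generalizing c0 seen with
  | nil => simp [prefs, PySem.Set.update_nil]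
  | cons c cs ih =>
    simp only [List.foldl_cons, prefs]
    rw [ih, ← PySem.Set.update_cons]

-- B's outer fold over the start indices
theorem outer_fold_bKeys (l : List Int) (s : String) (ls : Int) (sn : PySem.Set String) :
    (l.foldl (fun sn i =>
        ((PySem.Str.slice s (some i) (some ls)).toList.foldl
          (fun (p : String × PySem.Set String) ch =>
            let cur := p.1.push ch
            (cur, p.2.add cur)) ("", sn)).2) sn)
      = PySem.Set.update sn (l.flatMap (fun i => prefs "" (PySem.Str.slice s (some i) (some ls)).toList)) := by
  induction l generalizing sn with
  | nil => simp [PySem.Set.update_nil]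
  | cons i l ih =>
    simp only [List.foldl_cons, List.flatMap_cons]
    rw [ih, inner_fold_prefs, PySem.Set.update_append]

-- membership in prefs: the nonempty prefixes of cs, appended to c0
theorem mem_prefs (x : String) (c0 : String) (cs : List Char) :
    x ∈ prefs c0 cs ↔ ∃ k : Nat, k < cs.length ∧ x.toList = c0.toList ++ cs.take (k + 1) := by
  induction cs generalizing c0 with
  | nil => simp [prefs]
  | cons c cs ih =>
    simp only [prefs, List.mem_cons, ih]
    constructor
    · rintro (rfl | ⟨k, hk, hx⟩)
      · exact ⟨0, by simp, by simp [String.toList_push]⟩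
      · refine ⟨k + 1, by simpa using Nat.succ_lt_succ hk, ?_⟩
        rw [hx, String.toList_push, List.take_succ_cons]
        simp
    · rintro ⟨k, hk, hx⟩
      cases k with
      | zero =>
        left
        apply String.toList_inj.mp
        rw [hx, String.toList_push]
        simp
      | succ k =>
        right
        refine ⟨k, by simpa using Nat.lt_of_succ_lt_succ hk, ?_⟩
        rw [hx, String.toList_push, List.take_succ_cons]
        simp

-- membership in sliceKeys
theorem mem_sliceKeys (x : String) (s : String) (ls : Int) :
    x ∈ sliceKeys s ls ↔ ∃ i j : Int, 0 ≤ i ∧ i ≤ j ∧ j < ls ∧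
      x = PySem.Str.slice s (some i) (some (j + 1)) := by
  simp only [sliceKeys, List.mem_flatMap, List.mem_map, PySem.List.mem_pyRange_one]
  constructor
  · rintro ⟨i, ⟨hi0, _⟩, j, ⟨hij, hj⟩, rfl⟩
    exact ⟨i, j, hi0, hij, hj, rfl⟩
  · rintro ⟨i, j, hi0, hij, hj, rfl⟩
    exact ⟨i, ⟨hi0, by omega⟩, j, ⟨hij, hj⟩, rfl⟩

-- the clamping arithmetic: A's slices over [0,L) are B's substrings plus "" when L exceeds the length
theorem core (sl x : List Char) (L : Nat) (hL : 0 < L) :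
    (∃ i j : Nat, i ≤ j ∧ j < L ∧ x = (sl.drop i).take (j + 1 - i))
      ↔ ((∃ i k : Nat, i < min L sl.length ∧ k < min L sl.length - i ∧
            x = ((sl.take L).drop i).take (k + 1))
          ∨ (sl.length < L ∧ x = [])) := by
  constructor
  · rintro ⟨i, j, hij, hjL, rfl⟩
    by_cases hin : i < sl.length
    · left
      refine ⟨i, min (j - i) (min L sl.length - i - 1), by omega, by omega, ?_⟩
      rw [List.drop_take, List.take_take]
      apply List.take_eq_take_iff.mpr
      simp only [List.length_drop]
      omega
    · right
      refine ⟨by omega, ?_⟩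
      rw [List.drop_eq_nil_of_le (by omega)]
      simp
  · rintro (⟨i, k, him, hk, rfl⟩ | ⟨hn, rfl⟩)
    · refine ⟨i, i + k, by omega, by omega, ?_⟩
      rw [List.drop_take, List.take_take]
      apply (List.take_eq_take_iff.mpr _).symm
      simp only [List.length_drop]
      omega
    · refine ⟨L - 1, L - 1, le_refl _, by omega, ?_⟩
      rw [List.drop_eq_nil_of_le (by omega)]
      simp

-- PySem.Set.len as an Int-cast list length
theorem setlen_eq (s : PySem.Set String) : PySem.Set.len s = (s.length : Int) := by
  simp [PySem.Set.len]

-- the size of a dict is the length of its key list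
theorem size_eq_keys_length (d : PySem.Dict String Int) : d.size = d.keys.length := by
  simp [PySem.Dict.size, PySem.Dict.keys]

-- A's value is the number of distinct slice keys
theorem check_eq_card (s : String) (ls : Int) :
    check s ls = ((PySem.Set.ofList (sliceKeys s ls)).length : Int) := by
  have hk := keys_nested (PySem.List.pyRange 0 ls 1) (fun i => PySem.List.pyRange i ls 1)
    (fun i j => PySem.Str.slice s (some i) (some (j + 1))) PySem.Dict.empty
  rw [PySem.Dict.keys_empty, PySem.Set.update_nil_left] at hk
  simp only [check, size_eq_keys_length, sliceKeys]
  rw [hk]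

-- B's value is the number of distinct bKeys
theorem check_alt_eq_card (s : String) (ls : Int) :
    check_alt s ls = ((PySem.Set.ofList (bKeys s ls)).length : Int) := by
  simp only [check_alt]
  rw [outer_fold_bKeys, setlen_eq]
  exact congrArg (fun l : List String => ((l.length : Int))) (PySem.Set.update_nil_left _)

-- membership in A's key list, in Nat drop/take form
theorem mem_sliceKeys_nat (x : String) (s : String) (ls : Int) :
    x ∈ sliceKeys s ls ↔ ∃ i j : Nat, i ≤ j ∧ j < ls.toNat ∧
      x.toList = (s.toList.drop i).take (j + 1 - i) := by
  rw [mem_sliceKeys]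
  constructor
  · rintro ⟨i, j, hi0, hij, hj, rfl⟩
    refine ⟨i.toNat, j.toNat, by omega, by omega, ?_⟩
    rw [PySem.Str.toList_slice, PySem.Chars.slice_eq_listSlice,
      PySem.List.slice_toNat _ hi0 (by omega)]
    have e : (j + 1).toNat = j.toNat + 1 := by omega
    rw [e]
  · rintro ⟨i, j, hij, hj, hx⟩
    refine ⟨(i : Int), (j : Int), by omega, by omega, by omega, ?_⟩
    apply String.toList_inj.mp
    rw [hx, PySem.Str.toList_slice, PySem.Chars.slice_eq_listSlice,
      PySem.List.slice_toNat _ (by omega) (by omega)]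
    have e1 : ((i : Int)).toNat = i := by omega
    have e2 : ((j : Int) + 1).toNat = j + 1 := by omega
    rw [e1, e2]

-- membership in B's key list, in Nat drop/take form
theorem mem_bKeys_nat (x : String) (s : String) (ls : Int) :
    x ∈ bKeys s ls ↔ ∃ i k : Nat, i < min ls.toNat s.toList.length ∧
      k < min ls.toNat s.toList.length - i ∧
      x.toList = ((s.toList.take ls.toNat).drop i).take (k + 1) := by
  simp only [bKeys, List.mem_flatMap, PySem.List.mem_pyRange_one, mem_prefs]
  constructor
  · rintro ⟨i, ⟨hi0, hil⟩, k, hk, hx⟩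
    have hcs : (PySem.Str.slice s (some i) (some ls)).toList
        = (s.toList.drop i.toNat).take (ls.toNat - i.toNat) := by
      rw [PySem.Str.toList_slice, PySem.Chars.slice_eq_listSlice,
        PySem.List.slice_toNat _ hi0 (by omega)]
    rw [hcs] at hk hx
    simp only [List.length_take, List.length_drop] at hk
    refine ⟨i.toNat, k, by omega, by omega, ?_⟩
    rw [hx, List.drop_take, List.take_take]
    simp
  · rintro ⟨i, k, hi, hk, hx⟩
    refine ⟨(i : Int), ⟨by omega, by omega⟩, k, ?_, ?_⟩
    · rw [PySem.Str.toList_slice, PySem.Chars.slice_eq_listSlice,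
        PySem.List.slice_toNat _ (by omega) (by omega)]
      simp only [List.length_take, List.length_drop, Int.toNat_natCast]
      omega
    · rw [PySem.Str.toList_slice, PySem.Chars.slice_eq_listSlice,
        PySem.List.slice_toNat _ (by omega) (by omega), Int.toNat_natCast,
        hx, List.drop_take, List.take_take]
      simp

-- when 0 < ls <= len s, A's keys and B's keys are the same set
theorem keys_perm_of_le (s : String) (ls : Int) (h0 : 0 < ls) (hle : ls.toNat ≤ s.toList.length) :
    (PySem.Set.ofList (sliceKeys s ls)).Perm (PySem.Set.ofList (bKeys s ls)) := by
  rw [List.perm_ext_iff_of_nodup (PySem.Set.nodup_ofList _) (PySem.Set.nodup_ofList _)]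
  intro x
  rw [PySem.Set.mem_ofList, PySem.Set.mem_ofList, mem_sliceKeys_nat, mem_bKeys_nat,
    core s.toList x.toList ls.toNat (by omega)]
  constructor
  · rintro (h | ⟨hn, _⟩)
    · exact h
    · omega
  · exact fun h => Or.inl h

-- ===== VERDICT (by name: the statement is the Claim_ definition above) =====
set_option maxHeartbeats 1000000 in
theorem check_spec : Claim_equal_check := by
  intro s ls _ hPre
  unfold Pre_check at hPre
  unfold Spec_check
  rw [PySem.Str.len_eq] at hPre
  by_cases hls : ls ≤ 0
  · simp [check, check_alt, PySem.List.pyRange_one_eq_nil hls]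
  · rw [check_eq_card, check_alt_eq_card,
      (keys_perm_of_le s ls (by omega) (by omega)).length_eq]
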